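-- pv_equiv track=rewrite | github.com/JakeAttard/Python-2807ICT-NoteBook | WorkshopWeek8/problem5.py | function
-- ===== SOURCE A (Python) =====
-- def function(list, diff):
--     counter = 1
--     for a in list[::2]:
--         for b in list[1::2]:
--             if int(b) - int(a) == diff:
--                 counter += 1
--             elif int(b) - int(a) == -1 * diff:
--                 counter += 1
--             else:
--                 break
--     return counter
-- ===== SOURCE B (Python) =====
-- def function(list, diff):
--     # O(n): the inner scan stops at the first odd-position element outside
--     # {a+diff, a-diff}; that prefix can only contain the first one or two
--     # distinct odd-position values, so its length is one of 0, i2, i3,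
--     # computed once and reused for every a.
--     odds = list[1::2]
--     n = len(odds)
--     total = 1
--     if n == 0:
--         return total
--     v1 = odds[0]
--     i2 = 1
--     while i2 < n and odds[i2] == v1:
--         i2 += 1
--     v2 = odds[i2] if i2 < n else None
--     i3 = i2
--     if v2 is not None:
--         i3 += 1
--         while i3 < n and (odds[i3] == v1 or odds[i3] == v2):
--             i3 += 1
--     for a in list[::2]:
--         if v1 == a + diff or v1 == a - diff:
--             if v2 is not None and (v2 == a + diff or v2 == a - diff):
--                 total += i3
--             else:
--                 total += i2
--     return total
-- ===== Notes on version B (the rewrite author's own statement) =====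
-- stated objective: faster
-- what changed: A rescans list[1::2] from the front for every even-position element; B precomputes the first odd-position value, the length of its leading run, and the length of the leading run over the first two distinct odd-position values, then derives each element's prefix count in O(1), since the matching prefix {a+diff, a-diff} can contain at most the first two distinct values.
import Mathlib
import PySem

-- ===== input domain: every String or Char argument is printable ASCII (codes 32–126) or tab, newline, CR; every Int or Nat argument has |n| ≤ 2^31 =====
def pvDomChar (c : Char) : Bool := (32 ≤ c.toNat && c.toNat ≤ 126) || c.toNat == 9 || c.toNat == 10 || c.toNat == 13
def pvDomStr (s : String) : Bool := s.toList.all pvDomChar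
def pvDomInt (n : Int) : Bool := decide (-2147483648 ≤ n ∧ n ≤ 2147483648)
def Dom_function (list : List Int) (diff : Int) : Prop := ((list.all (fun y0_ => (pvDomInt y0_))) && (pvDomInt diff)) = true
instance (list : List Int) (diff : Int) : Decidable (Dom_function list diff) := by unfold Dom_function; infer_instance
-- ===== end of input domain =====

-- B replaces A's inner scan (restarted from the front of list[1::2] for every even-position
-- element) by three precomputed quantities, so each even-position element is handled in O(1).

-- exact hand port of the full-list step-2 slices xs[::2] (and, applied to xs.tail, xs[1::2]):
-- every second element starting at the head
def pyStep2 : List Int → List Int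
  | [] => []
  | [x] => [x]
  | x :: _ :: r => x :: pyStep2 r

-- ===== PORT A =====
-- inner 'for b in list[1::2]' loop with its break, threading the counter
def functionInner (a diff : Int) : List Int → Int → Int
  | [], c => c
  | b :: rest, c =>
    if b - a = diff then functionInner a diff rest (c + 1)
    else if b - a = -1 * diff then functionInner a diff rest (c + 1)
    else c

def function (list : List Int) (diff : Int) : Int :=
  (pyStep2 list).foldl (fun c a => functionInner a diff (pyStep2 list.tail) c) 1

-- ===== PORT B =====
-- port of Source B's first while loop: number of leading elements equal to v
def runLen1 (v : Int) : List Int → Nat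
  | [] => 0
  | b :: r => if b = v then runLen1 v r + 1 else 0

-- port of Source B's second while loop: number of leading elements in {v1, v2}
def runLen2 (v1 v2 : Int) : List Int → Nat
  | [] => 0
  | b :: r => if b = v1 ∨ b = v2 then runLen2 v1 v2 r + 1 else 0

def function_alt (list : List Int) (diff : Int) : Int :=
  match pyStep2 list.tail with
  | [] => 1
  | v1 :: rest =>
    let i2 : Nat := 1 + runLen1 v1 rest
    let v2? : Option Int := (rest.drop (runLen1 v1 rest)).head?
    let i3 : Nat :=
      match rest.drop (runLen1 v1 rest) with
      | [] => i2
      | v2 :: rest2 => i2 + 1 + runLen2 v1 v2 rest2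
    (pyStep2 list).foldl (fun total a =>
      if v1 = a + diff ∨ v1 = a - diff then
        match v2? with
        | some v2 =>
          if v2 = a + diff ∨ v2 = a - diff then total + (i3 : Int) else total + (i2 : Int)
        | none => total + (i2 : Int)
      else total) 1

-- ===== PRECONDITION & SPEC =====
def Spec_function (list : List Int) (diff : Int) (out : Int) : Prop := out = function_alt list diff
instance (list : List Int) (diff : Int) (out : Int) : Decidable (Spec_function list diff out) := by unfold Spec_function; infer_instance

-- ===== CLAIM (what is proved, stated in full; the proofs are below) =====
def Claim_equal_function : Prop := ∀ (list : List Int) (diff : Int), Dom_function list diff → Spec_function list diff (function list diff)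

-- ===== LEMMAS AND PROOFS =====

-- the predicate of A's inner loop, and the membership predicates of B's two runs
def pA (a diff b : Int) : Bool := decide (b - a = diff ∨ b - a = -1 * diff)
def pOne (v b : Int) : Bool := decide (b = v)
def pTwo (v1 v2 b : Int) : Bool := decide (b = v1 ∨ b = v2)

-- A's inner loop adds the length of the prefix of odds lying in {a+diff, a-diff}
lemma functionInner_eq (a diff : Int) (odds : List Int) (c : Int) :
    functionInner a diff odds c = c + ((odds.takeWhile (pA a diff)).length : Int) := by
  induction odds generalizing c with
  | nil => simp [functionInner]
  | cons b r ih =>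
    by_cases h1 : b - a = diff
    · have hp : pA a diff b = true := by simp [pA, h1]
      simp [functionInner, h1, hp, ih]; ring
    · by_cases h2 : b - a = -1 * diff
      · have hp : pA a diff b = true := by simp [pA]; omega
        have h2' : b - a = -diff := by omega
        simp [functionInner, h2', hp, ih]; ring
      · have hp : pA a diff b = false := by simp [pA]; omega
        have h2' : ¬ b - a = -diff := by omega
        simp [functionInner, h1, h2', hp]

lemma runLen2_eq (v1 v2 : Int) (l : List Int) :
    runLen2 v1 v2 l = (l.takeWhile (pTwo v1 v2)).length := by
  induction l with
  | nil => simp [runLen2]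
  | cons b r ih =>
    by_cases h : b = v1 ∨ b = v2
    · have hp : pTwo v1 v2 b = true := by simp [pTwo]; tauto
      simp [runLen2, h, hp, ih]
    · have hp : pTwo v1 v2 b = false := by simp [pTwo]; tauto
      simp [runLen2, h, hp]

lemma take_runLen1 (v : Int) (l : List Int) :
    l.take (runLen1 v l) = List.replicate (runLen1 v l) v := by
  induction l with
  | nil => simp [runLen1]
  | cons b r ih =>
    by_cases h : b = v <;> simp [runLen1, h, List.replicate_succ, ih]

lemma head?_drop_runLen1 (v : Int) (l : List Int) (w : Int)
    (h : (l.drop (runLen1 v l)).head? = some w) : w ≠ v := by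
  induction l with
  | nil => simp [runLen1] at h
  | cons b r ih =>
    by_cases hb : b = v
    · have he : runLen1 v (b :: r) = runLen1 v r + 1 := by simp [runLen1, hb]
      rw [he, List.drop_succ_cons] at h
      exact ih h
    · have he : runLen1 v (b :: r) = 0 := by simp [runLen1, hb]
      rw [he, List.drop_zero, List.head?_cons] at h
      injection h with h
      omega

lemma takeWhile_replicate_append (p : Int → Bool) (k : Nat) (v : Int) (l : List Int)
    (hv : p v = true) :
    (List.replicate k v ++ l).takeWhile p = List.replicate k v ++ l.takeWhile p := by
  induction k with
  | zero => simp
  | succ n ih => simp [List.replicate_succ, hv, ih]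

-- the step equality: A's inner loop on odds = v1 :: rest equals B's O(1) contribution
lemma step_eq (diff v1 a c : Int) (rest : List Int) :
    functionInner a diff (v1 :: rest) c =
      (if v1 = a + diff ∨ v1 = a - diff then
        match (rest.drop (runLen1 v1 rest)).head? with
        | some v2 =>
          if v2 = a + diff ∨ v2 = a - diff then
            c + ((match rest.drop (runLen1 v1 rest) with
                  | [] => 1 + runLen1 v1 rest
                  | v2' :: rest2 => (1 + runLen1 v1 rest) + 1 + runLen2 v1 v2' rest2 : Nat) : Int)
          else c + ((1 + runLen1 v1 rest : Nat) : Int)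
        | none => c + ((1 + runLen1 v1 rest : Nat) : Int)
      else c) := by
  rw [functionInner_eq]
  set k := runLen1 v1 rest with hk
  have hsplit : rest = List.replicate k v1 ++ rest.drop k := by
    conv_lhs => rw [← List.take_append_drop k rest]
    rw [hk, take_runLen1]
  by_cases hv1 : v1 = a + diff ∨ v1 = a - diff
  · have hpv1 : pA a diff v1 = true := by simp [pA]; omega
    cases hdrop : rest.drop k with
    | nil =>
      have hrest : rest = List.replicate k v1 := by rw [hsplit, hdrop, List.append_nil]
      rw [if_pos hv1]
      conv_lhs => rw [hrest]
      have hrep := takeWhile_replicate_append (pA a diff) k v1 [] hpv1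
      simp only [List.append_nil, List.takeWhile_nil] at hrep
      simp [hpv1, hrep]
      omega
    | cons v2 rest2 =>
      have hne : v2 ≠ v1 := head?_drop_runLen1 v1 rest v2 (by rw [← hk, hdrop]; rfl)
      rw [if_pos hv1]
      simp only [List.head?_cons]
      by_cases hv2 : v2 = a + diff ∨ v2 = a - diff
      · -- both values admissible: A's predicate coincides with membership in {v1, v2}
        have hfun : pA a diff = pTwo v1 v2 := by
          funext b; simp only [pA, pTwo, decide_eq_decide]; omega
        have h1 : pTwo v1 v2 v1 = true := by simp [pTwo]
        have h2 : pTwo v1 v2 v2 = true := by simp [pTwo]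
        conv_lhs => rw [hsplit, hdrop, hfun]
        rw [if_pos hv2]
        simp [h1, h2,
          takeWhile_replicate_append (pTwo v1 v2) k v1 (v2 :: rest2) h1, runLen2_eq]
        ring
      · have hpv2 : pA a diff v2 = false := by simp [pA]; omega
        conv_lhs => rw [hsplit, hdrop]
        rw [if_neg hv2]
        simp [hpv1, hpv2,
          takeWhile_replicate_append (pA a diff) k v1 (v2 :: rest2) hpv1]
        omega
  · have hpv1 : pA a diff v1 = false := by simp [pA]; omega
    rw [if_neg hv1]
    simp [hpv1]

-- ===== VERDICT (by name: the statement is the Claim_ definition above) =====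
theorem function_spec : Claim_equal_function := by
  intro list diff _
  unfold Spec_function function function_alt
  cases hodds : pyStep2 list.tail with
  | nil =>
    induction pyStep2 list with
    | nil => rfl
    | cons a evens ih => simpa [functionInner] using ih
  | cons v1 rest =>
    generalize (1 : Int) = c
    induction pyStep2 list generalizing c with
    | nil => rfl
    | cons a evens ih =>
      simp only [List.foldl_cons]
      rw [step_eq diff v1 a c rest]
      rw [ih]
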